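-- pv_equiv track=rewrite | github.com/CJavaPython/thisIsCodingTestBook | 2.Implement/02.py | func
-- ===== SOURCE A (Python) =====
-- def func(num):
--     result = 0
--     for i in range(num+1):
--         for j in range(60):
--             for k in range(60):
--                 if '3' in str(i) + str(j) + str(k):
--                     result+=1
--     return result
-- ===== SOURCE B (Python) =====
-- def func(num):
--     # Precompute once how many (j, k) pairs in [0,60)x[0,60) contain a '3',
--     # then do a single pass over i: the two inner loops disappear.
--     pair_hits = 0
--     for j in range(60):
--         for k in range(60):
--             if '3' in str(j) + str(k):
--                 pair_hits += 1
--     result = 0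
--     for i in range(num + 1):
--         result += 3600 if '3' in str(i) else pair_hits
--     return result
-- ===== Notes on version B (the rewrite author's own statement) =====
-- stated objective: faster
-- what changed: The 60*60 inner double loop is hoisted out and evaluated once (count of (j,k) pairs containing '3'); the main loop over i becomes a single pass adding either the full pair count or that precomputed constant.
import Mathlib
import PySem

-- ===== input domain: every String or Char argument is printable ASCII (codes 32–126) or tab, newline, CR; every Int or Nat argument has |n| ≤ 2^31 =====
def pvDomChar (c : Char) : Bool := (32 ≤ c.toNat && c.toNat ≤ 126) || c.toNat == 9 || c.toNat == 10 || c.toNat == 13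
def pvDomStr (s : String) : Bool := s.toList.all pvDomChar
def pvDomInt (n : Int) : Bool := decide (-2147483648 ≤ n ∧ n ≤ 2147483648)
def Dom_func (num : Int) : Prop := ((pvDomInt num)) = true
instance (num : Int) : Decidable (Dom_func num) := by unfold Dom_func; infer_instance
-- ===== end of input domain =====

-- B hoists the 60x60 inner double loop out of the main loop (computed once) and does a
-- single pass over i; equivalence of return values is proved for every num (both are total).

-- ===== PORT A =====
def func (num : Int) : Int :=
  (PySem.List.pyRange 0 (num + 1) 1).foldl (fun result i =>
    (PySem.List.pyRange 0 60 1).foldl (fun result j =>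
      (PySem.List.pyRange 0 60 1).foldl (fun result k =>
        if PySem.Str.isIn "3" (PySem.Int.toStr i ++ PySem.Int.toStr j ++ PySem.Int.toStr k)
        then result + 1 else result) result) result) 0

-- ===== PORT B =====
def func_alt (num : Int) : Int :=
  let pairHits : Int :=
    (PySem.List.pyRange 0 60 1).foldl (fun pairHits j =>
      (PySem.List.pyRange 0 60 1).foldl (fun pairHits k =>
        if PySem.Str.isIn "3" (PySem.Int.toStr j ++ PySem.Int.toStr k)
        then pairHits + 1 else pairHits) pairHits) 0
  (PySem.List.pyRange 0 (num + 1) 1).foldl (fun result i =>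
    result + (if PySem.Str.isIn "3" (PySem.Int.toStr i) then 3600 else pairHits)) 0

-- ===== PRECONDITION & SPEC =====
def Spec_func (num : Int) (out : Int) : Prop := out = func_alt num
instance (num : Int) (out : Int) : Decidable (Spec_func num out) := by unfold Spec_func; infer_instance

-- ===== CLAIM (what is proved, stated in full; the proofs are below) =====
def Claim_equal_func : Prop := ∀ (num : Int), Dom_func num → Spec_func num (func num)

-- ===== LEMMAS AND PROOFS =====

-- a singleton list is an infix iff its element is a member
theorem pv_singleton_infix {α : Type} (a : α) (l : List α) : [a] <:+: l ↔ a ∈ l := by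
  constructor
  · intro h
    exact List.singleton_sublist.mp h.sublist
  · intro h
    obtain ⟨s, t, rfl⟩ := List.append_of_mem h
    exact ⟨s, t, by simp⟩

-- '3' in (x ++ y)  =  ('3' in x) || ('3' in y)   at the Chars level
theorem pv_isIn3_append (x y : List Char) :
    PySem.Chars.isIn ['3'] (x ++ y) = (PySem.Chars.isIn ['3'] x || PySem.Chars.isIn ['3'] y) := by
  rcases h : (PySem.Chars.isIn ['3'] x || PySem.Chars.isIn ['3'] y) with _ | _
  · simp only [Bool.or_eq_false_iff] at h
    obtain ⟨h1, h2⟩ := h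
    rw [PySem.Chars.isIn_eq_false_iff, pv_singleton_infix] at h1 h2 ⊢
    simp [h1, h2]
  · rw [PySem.Chars.isIn_iff_infix, pv_singleton_infix]
    rcases Bool.or_eq_true_iff.mp h with h' | h' <;>
      · rw [PySem.Chars.isIn_iff_infix, pv_singleton_infix] at h'
        simp [h']

-- a fold whose step satisfies f r x = r + f 0 x shifts its initial accumulator out
theorem pv_foldl_shift {α : Type} (f : Int → α → Int) (h : ∀ r x, f r x = r + f 0 x)
    (l : List α) (r : Int) : l.foldl f r = r + l.foldl f 0 := by
  induction l generalizing r with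
  | nil => simp
  | cons a t ih => simp only [List.foldl_cons]; rw [ih, ih (f 0 a), h r a]; ring

-- the 60x60 double fold with condition (b || '3'∈str j || '3'∈str k)
def pvInner (b : Bool) (r : Int) : Int :=
  (PySem.List.pyRange 0 60 1).foldl (fun r j =>
    (PySem.List.pyRange 0 60 1).foldl (fun r k =>
      if b || PySem.Chars.isIn ['3'] (PySem.Int.toChars j)
           || PySem.Chars.isIn ['3'] (PySem.Int.toChars k)
      then r + 1 else r) r) r

theorem pv_inner_step (b : Bool) (r : Int) (j : Int) :
    (PySem.List.pyRange 0 60 1).foldl (fun r k =>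
      if b || PySem.Chars.isIn ['3'] (PySem.Int.toChars j)
           || PySem.Chars.isIn ['3'] (PySem.Int.toChars k)
      then r + 1 else r) r
    = r + (PySem.List.pyRange 0 60 1).foldl (fun r k =>
      if b || PySem.Chars.isIn ['3'] (PySem.Int.toChars j)
           || PySem.Chars.isIn ['3'] (PySem.Int.toChars k)
      then r + 1 else r) 0 := by
  apply pv_foldl_shift
  intro r x
  split <;> omega

theorem pv_inner_shift (b : Bool) (r : Int) : pvInner b r = r + pvInner b 0 := by
  unfold pvInner
  apply pv_foldl_shift
  intro r j
  rw [pv_inner_step]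

-- the inner k-fold, from 0, for fixed b and j
theorem pv_h_val (b : Bool) (j : Int) :
    (PySem.List.pyRange 0 60 1).foldl (fun r k =>
      if b || PySem.Chars.isIn ['3'] (PySem.Int.toChars j)
           || PySem.Chars.isIn ['3'] (PySem.Int.toChars k)
      then r + 1 else r) (0 : Int)
    = if b || PySem.Chars.isIn ['3'] (PySem.Int.toChars j) then 60 else 15 := by
  rcases hb : (b || PySem.Chars.isIn ['3'] (PySem.Int.toChars j)) with _ | _
  · simp only [Bool.false_or]
    decide
  · simp only [Bool.true_or]
    decide

theorem pv_inner0 (b : Bool) : pvInner b 0 =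
    (PySem.List.pyRange 0 60 1).foldl (fun r j =>
      r + (if b || PySem.Chars.isIn ['3'] (PySem.Int.toChars j) then 60 else 15)) 0 := by
  unfold pvInner
  apply PySem.List.foldl_congr_mem
  intro r j _
  rw [pv_inner_step, pv_h_val]

theorem pv_inner_val (b : Bool) (r : Int) :
    pvInner b r = r + (if b then 3600 else 1575) := by
  rw [pv_inner_shift, pv_inner0]
  cases b <;> (norm_num; decide)

-- canonical single-pass form shared by both ports
def pvCanon (num : Int) : Int :=
  (PySem.List.pyRange 0 (num + 1) 1).foldl (fun r i =>
    r + (if PySem.Chars.isIn ['3'] (PySem.Int.toChars i) then 3600 else 1575)) 0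

theorem pv_func_eq_canon (num : Int) : func num = pvCanon num := by
  unfold func pvCanon
  apply PySem.List.foldl_congr_mem
  intro r i _
  have : (PySem.List.pyRange 0 60 1).foldl (fun result j =>
      (PySem.List.pyRange 0 60 1).foldl (fun result k =>
        if PySem.Str.isIn "3" (PySem.Int.toStr i ++ PySem.Int.toStr j ++ PySem.Int.toStr k)
        then result + 1 else result) result) r
      = pvInner (PySem.Chars.isIn ['3'] (PySem.Int.toChars i)) r := by
    unfold pvInner
    apply PySem.List.foldl_congr_mem
    intro r' j _
    apply PySem.List.foldl_congr_mem
    intro r'' k _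
    congr 1
    simp [PySem.Str.isIn_eq, PySem.Int.toList_toStr, pv_isIn3_append, Bool.or_assoc]
  rw [this, pv_inner_val]

theorem pv_pairHits_val :
    (PySem.List.pyRange 0 60 1).foldl (fun pairHits j =>
      (PySem.List.pyRange 0 60 1).foldl (fun pairHits k =>
        if PySem.Str.isIn "3" (PySem.Int.toStr j ++ PySem.Int.toStr k)
        then pairHits + 1 else pairHits) pairHits) (0 : Int) = 1575 := by
  have h : (PySem.List.pyRange 0 60 1).foldl (fun pairHits j =>
      (PySem.List.pyRange 0 60 1).foldl (fun pairHits k =>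
        if PySem.Str.isIn "3" (PySem.Int.toStr j ++ PySem.Int.toStr k)
        then pairHits + 1 else pairHits) pairHits) (0 : Int) = pvInner false 0 := by
    unfold pvInner
    apply PySem.List.foldl_congr_mem
    intro r j _
    apply PySem.List.foldl_congr_mem
    intro r' k _
    congr 1
    simp [PySem.Str.isIn_eq, PySem.Int.toList_toStr, pv_isIn3_append]
  rw [h, pv_inner_val]
  norm_num

theorem pv_func_alt_eq_canon (num : Int) : func_alt num = pvCanon num := by
  unfold func_alt pvCanon
  rw [pv_pairHits_val]
  apply PySem.List.foldl_congr_mem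
  intro r i _
  congr 1
  simp [PySem.Str.isIn_eq, PySem.Int.toList_toStr]

-- ===== VERDICT (by name: the statement is the Claim_ definition above) =====
theorem func_spec : Claim_equal_func := by
  intro num _
  unfold Spec_func
  rw [pv_func_eq_canon, pv_func_alt_eq_canon]
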